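-- pv_equiv track=rewrite | github.com/dmg210/GKFlasher | ecu.py | calculate_key
-- ===== SOURCE A (Python) =====
-- def calculate_key(concat11_seed):
--     key = 0
--     index = 0
--
--     while index < 0x10:
--         if (concat11_seed & (1 << (index & 0x1f))) != 0:
--             key = key ^ 0xffff << (index & 0x1f)
--         index += 1
--
--     return key
-- ===== SOURCE B (Python) =====
-- def calculate_key(concat11_seed):
--     key = 0
--     for i in range(16):
--         key = (key << 1) ^ (0xffff if (concat11_seed >> (15 - i)) & 1 else 0)
--     return key
-- ===== Notes on version B (the rewrite author's own statement) =====
-- stated objective: alternative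
-- what changed: B builds the key MSB-first with a shift-and-xor (Horner) accumulator over the seed's low sixteen bits, shifting the accumulator each step and XORing in the constant mask when the current bit is set, instead of A's LSB-first loop that XORs the fixed mask shifted by each set bit position.
import Mathlib
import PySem

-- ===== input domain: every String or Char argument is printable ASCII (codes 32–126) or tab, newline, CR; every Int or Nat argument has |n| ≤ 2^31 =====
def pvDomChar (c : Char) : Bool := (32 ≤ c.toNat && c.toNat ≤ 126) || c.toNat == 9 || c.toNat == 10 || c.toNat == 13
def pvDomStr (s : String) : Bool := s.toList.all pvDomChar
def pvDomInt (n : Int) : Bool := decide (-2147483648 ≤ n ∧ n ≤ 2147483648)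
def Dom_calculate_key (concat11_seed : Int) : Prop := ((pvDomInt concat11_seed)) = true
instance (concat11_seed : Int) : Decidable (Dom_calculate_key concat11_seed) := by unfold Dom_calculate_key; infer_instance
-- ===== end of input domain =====

-- B replaces A's LSB-first "XOR a fixed 0xffff mask shifted by each set seed-bit position" loop by an
-- MSB-first shift-and-xor (Horner) accumulator; same cost, different decomposition (objective: alternative).

-- ===== PORT A =====
-- 'index = 0; while index < 0x10: …; index += 1' is a fold over the index range 0..15
def calculate_key (concat11_seed : Int) : Int :=
  (List.range 16).foldl
    (fun (key : Int) (index : Nat) =>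
      if PySem.Int.band concat11_seed (((1 <<< (index &&& 0x1f) : Nat) : Int)) ≠ 0
      then PySem.Int.bxor key (((0xffff <<< (index &&& 0x1f) : Nat) : Int))
      else key) 0

-- ===== PORT B =====
def calculate_key_alt (concat11_seed : Int) : Int :=
  (List.range 16).foldl
    (fun (key : Int) (i : Nat) =>
      PySem.Int.bxor (key <<< 1)
        (if PySem.Int.band (concat11_seed >>> (15 - i)) 1 ≠ 0 then 0xffff else 0)) 0

-- ===== PRECONDITION & SPEC =====
def Spec_calculate_key (concat11_seed : Int) (out : Int) : Prop := out = calculate_key_alt concat11_seed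
instance (concat11_seed : Int) (out : Int) : Decidable (Spec_calculate_key concat11_seed out) := by unfold Spec_calculate_key; infer_instance

-- ===== CLAIM (what is proved, stated in full; the proofs are below) =====
def Claim_equal_calculate_key : Prop := ∀ (concat11_seed : Int), Dom_calculate_key concat11_seed → Spec_calculate_key concat11_seed (calculate_key concat11_seed)

-- ===== LEMMAS AND PROOFS =====

/-- Bit `j` of `s` in Python's infinite two's complement. -/
def pvBit (s : Int) (j : Nat) : Bool := if 0 ≤ s then s.toNat.testBit j else !((-s - 1).toNat.testBit j)

def pvStepA (b : Nat → Bool) (k i : Nat) : Nat := if b i then k ^^^ (65535 <<< i) else k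

def pvHorner (b : Nat → Bool) (a : Nat) : Nat → Nat
  | 0 => a
  | n + 1 => pvHorner b ((a <<< 1) ^^^ cond (b n) 65535 0) n

theorem pv_shiftLeft_xor (x y n : Nat) : (x ^^^ y) <<< n = (x <<< n) ^^^ (y <<< n) := by
  apply Nat.eq_of_testBit_eq
  intro i
  simp only [Nat.testBit_shiftLeft, Nat.testBit_xor]
  cases h : decide (i ≥ n) <;> simp

theorem pv_shiftLeft_one_shift (a n : Nat) : (a <<< 1) <<< n = a <<< (n + 1) := by
  simp [Nat.shiftLeft_eq, pow_succ]; ring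

theorem pv_cond_shift (c : Bool) (n : Nat) :
    (cond c 65535 0 : Nat) <<< n = cond c ((65535 : Nat) <<< n) 0 := by
  cases c <;> simp

theorem pv_stepA_as_xor (b : Nat → Bool) (k i : Nat) :
    pvStepA b k i = k ^^^ cond (b i) ((65535 : Nat) <<< i) 0 := by
  unfold pvStepA; cases b i <;> simp

/-- Horner accumulation = shifted accumulator XOR the masked sum over the low `n` bits. -/
theorem pv_horner_eq (b : Nat → Bool) :
    ∀ n a, pvHorner b a n = (a <<< n) ^^^ (List.range n).foldl (pvStepA b) 0 := by
  intro n
  induction n with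
  | zero => intro a; simp [pvHorner]
  | succ n ih =>
    intro a
    have hr : (List.range (n + 1)).foldl (pvStepA b) 0
        = ((List.range n).foldl (pvStepA b) 0) ^^^ cond (b n) ((65535 : Nat) <<< n) 0 := by
      rw [List.range_succ, List.foldl_append]
      simp [pv_stepA_as_xor]
    rw [hr]
    show pvHorner b ((a <<< 1) ^^^ cond (b n) 65535 0) n = _
    rw [ih, pv_shiftLeft_xor, pv_shiftLeft_one_shift, pv_cond_shift]
    simp [Nat.xor_comm, Nat.xor_left_comm]

/-- The MSB-first fold over `range m` is the Horner recursion. -/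
theorem pv_fold_horner (b : Nat → Bool) :
    ∀ m a, (List.range m).foldl (fun k i => (k <<< 1) ^^^ cond (b (m - 1 - i)) 65535 0) a
      = pvHorner b a m := by
  intro m
  induction m with
  | zero => intro a; simp [pvHorner]
  | succ m ih =>
    intro a
    rw [List.range_succ_eq_map]
    simp only [List.foldl_cons, List.foldl_map]
    have h1 : m + 1 - 1 - 0 = m := by omega
    rw [h1]
    have h2 : (fun (k i : Nat) => (k <<< 1) ^^^ cond (b (m + 1 - 1 - (i + 1))) 65535 0)
        = (fun (k i : Nat) => (k <<< 1) ^^^ cond (b (m - 1 - i)) 65535 0) := by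
      funext k i
      have h3 : m + 1 - 1 - (i + 1) = m - 1 - i := by omega
      rw [h3]
    rw [h2, ih]
    rfl

/-- Lift an `Int`-valued fold along a `Nat`-valued one through the cast. -/
theorem pv_lift_foldl (fI : Int → Nat → Int) (fN : Nat → Nat → Nat)
    (h : ∀ (K : Nat) (i : Nat), fI (↑K) i = ↑(fN K i)) :
    ∀ (l : List Nat) (K : Nat), List.foldl fI (↑K) l = ↑(List.foldl fN K l) := by
  intro l
  induction l with
  | nil => intro K; rfl
  | cons a t ih => intro K; simp only [List.foldl_cons, h]; exact ih _

theorem pv_testBit_mod (n j : Nat) : n.testBit j = true ↔ (n >>> j) % 2 = 1 := by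
  simp [Nat.testBit, Nat.and_comm, Nat.and_one_is_mod]

theorem pv_band_two_pow (s : Int) (j : Nat) :
    (PySem.Int.band s (((1 <<< j : Nat) : Int)) ≠ 0) ↔ pvBit s j = true := by
  rw [Nat.one_shiftLeft]
  have hb : (0 : Int) ≤ ((2 ^ j : Nat) : Int) := by positivity
  unfold PySem.Int.band pvBit
  by_cases hs : (0 : Int) ≤ s
  · simp only [hs, hb, if_true, Int.toNat_natCast]
    rw [Nat.and_two_pow]
    cases h : s.toNat.testBit j <;> simp [h]
  · simp only [hs, hb, if_true, if_false, Int.toNat_natCast]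
    rw [Nat.two_pow_and]
    cases h : (-s - 1).toNat.testBit j <;> simp [h]

theorem pv_band_one_shift (s : Int) (j : Nat) :
    (PySem.Int.band (s >>> j) 1 ≠ 0) ↔ pvBit s j = true := by
  cases s with
  | ofNat n =>
    have hsr : (Int.ofNat n) >>> j = Int.ofNat (n >>> j) := rfl
    rw [hsr]
    unfold PySem.Int.band pvBit
    have h0 : (0 : Int) ≤ Int.ofNat (n >>> j) := Int.natCast_nonneg _
    have h0' : (0 : Int) ≤ Int.ofNat n := Int.natCast_nonneg _
    simp only [h0, h0', if_true, (by norm_num : (0 : Int) ≤ 1), Int.toNat_one]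
    have hto : (Int.ofNat (n >>> j)).toNat = n >>> j := rfl
    have hto' : (Int.ofNat n).toNat = n := rfl
    rw [hto, hto', Nat.and_one_is_mod, pv_testBit_mod]
    omega
  | negSucc m =>
    have hsr : (Int.negSucc m) >>> j = Int.negSucc (m >>> j) := rfl
    rw [hsr]
    unfold PySem.Int.band pvBit
    have hneg : ¬ (0 : Int) ≤ Int.negSucc (m >>> j) := of_decide_eq_false rfl
    have hneg' : ¬ (0 : Int) ≤ Int.negSucc m := of_decide_eq_false rfl
    simp only [hneg, hneg', if_true, if_false, (by norm_num : (0 : Int) ≤ 1), Int.toNat_one]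
    have hm : (-(Int.negSucc (m >>> j)) - 1).toNat = m >>> j := by
      rw [Int.neg_negSucc]; omega
    have hm' : (-(Int.negSucc m) - 1).toNat = m := by
      rw [Int.neg_negSucc]; omega
    rw [hm, hm', Nat.and_comm, Nat.and_one_is_mod]
    have h := pv_testBit_mod m j
    cases hbit : m.testBit j <;> simp only [hbit] at h ⊢
    · have h2 : ¬ (m >>> j % 2 = 1) := fun hc => Bool.false_ne_true (h.mpr hc)
      simp only [Bool.not_false, ne_eq, Nat.cast_eq_zero, iff_true]
      omega
    · have h2 : m >>> j % 2 = 1 := h.mp trivial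
      simp only [Bool.not_true, Nat.cast_eq_zero, ne_eq]
      simp [h2]

theorem pv_mask_id (i : Nat) (hi : i < 16) : i &&& 31 = i := by
  have h : i &&& 31 = i % 32 := by
    have h5 := Nat.and_two_pow_sub_one_eq_mod i 5
    norm_num at h5
    exact h5
  rw [h, Nat.mod_eq_of_lt (by omega)]

theorem pv_portA_nat (s : Int) :
    calculate_key s = ↑((List.range 16).foldl (fun k i => pvStepA (pvBit s) k (i &&& 31)) 0) := by
  unfold calculate_key
  have hstep : ∀ (K : Nat) (i : Nat),
      (if PySem.Int.band s (((1 <<< (i &&& 0x1f) : Nat) : Int)) ≠ 0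
       then PySem.Int.bxor (↑K) (((0xffff <<< (i &&& 0x1f) : Nat) : Int))
       else (↑K : Int))
      = ↑(pvStepA (pvBit s) K (i &&& 31)) := by
    intro K i
    unfold pvStepA
    by_cases hc : PySem.Int.band s (((1 <<< (i &&& 0x1f) : Nat) : Int)) ≠ 0
    · rw [if_pos hc, if_pos ((pv_band_two_pow s (i &&& 31)).mp hc), PySem.Int.bxor_natCast]
    · rw [if_neg hc, if_neg (fun hbit => hc ((pv_band_two_pow s (i &&& 31)).mpr hbit))]
  exact pv_lift_foldl _ _ hstep (List.range 16) 0

theorem pv_portB_nat (s : Int) :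
    calculate_key_alt s
      = ↑((List.range 16).foldl (fun k i => (k <<< 1) ^^^ cond (pvBit s (15 - i)) 65535 0) 0) := by
  unfold calculate_key_alt
  have hstep : ∀ (K : Nat) (i : Nat),
      (PySem.Int.bxor ((↑K : Int) <<< 1)
        (if PySem.Int.band (s >>> (15 - i)) 1 ≠ 0 then 0xffff else 0))
      = ↑((K <<< 1) ^^^ cond (pvBit s (15 - i)) 65535 0) := by
    intro K i
    have hsh : ((↑K : Int)) <<< 1 = ((K <<< 1 : Nat) : Int) := by
      rfl
    have harg : (if PySem.Int.band (s >>> (15 - i)) 1 ≠ 0 then (0xffff : Int) else 0)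
        = ((cond (pvBit s (15 - i)) 65535 0 : Nat) : Int) := by
      by_cases hc : PySem.Int.band (s >>> (15 - i)) 1 ≠ 0
      · rw [if_pos hc, (pv_band_one_shift s (15 - i)).mp hc]
        norm_num
      · have hbf : pvBit s (15 - i) = false := by
          cases hb : pvBit s (15 - i)
          · rfl
          · exact absurd ((pv_band_one_shift s (15 - i)).mpr hb) hc
        rw [if_neg hc, hbf]
        norm_num
    rw [hsh, harg, PySem.Int.bxor_natCast]
  exact pv_lift_foldl _ _ hstep (List.range 16) 0

theorem pv_nat_sides_eq (b : Nat → Bool) :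
    (List.range 16).foldl (fun k i => (k <<< 1) ^^^ cond (b (15 - i)) 65535 0) 0
      = (List.range 16).foldl (fun k i => pvStepA b k (i &&& 31)) 0 := by
  have hfun : (fun (k i : Nat) => (k <<< 1) ^^^ cond (b (16 - 1 - i)) 65535 0)
      = (fun (k i : Nat) => (k <<< 1) ^^^ cond (b (15 - i)) 65535 0) := by
    funext k i
    norm_num
  have hB : (List.range 16).foldl (fun k i => (k <<< 1) ^^^ cond (b (15 - i)) 65535 0) 0
      = pvHorner b 0 16 := by
    rw [← hfun]
    exact pv_fold_horner b 16 0
  have hA : (List.range 16).foldl (fun k i => pvStepA b k (i &&& 31)) 0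
      = (List.range 16).foldl (pvStepA b) 0 := by
    apply PySem.List.foldl_congr_mem
    intro k i hi
    rw [pv_mask_id i (List.mem_range.mp hi)]
  rw [hB, hA, pv_horner_eq b 16 0]
  simp

-- ===== VERDICT (by name: the statement is the Claim_ definition above) =====
theorem calculate_key_spec : Claim_equal_calculate_key := by
  intro s _
  unfold Spec_calculate_key
  rw [pv_portA_nat, pv_portB_nat, pv_nat_sides_eq]
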